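-- pv_equiv track=rewrite | github.com/seebye/ueberzug | ueberzug/xutil.py | get_first_window_id
-- ===== SOURCE A (Python) =====
-- def get_first_window_id(pid_window_id_map: dict, pids: list):
--     """Determines the window id of the youngest
--     parent owning a window.
--     """
--     win_ids_res = [None] * len(pids)
--
--     for pid, window_id in pid_window_id_map.items():
--         try:
--             win_ids_res[pids.index(pid)] = window_id
--         except ValueError:
--             pass
--
--     try:
--         return next(i for i in win_ids_res if i)
--     except StopIteration:
--         # Window needs to be mapped,
--         # otherwise it's not listed in _NET_CLIENT_LIST
--         return None
-- ===== SOURCE B (Python) =====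
-- def get_first_window_id(pid_window_id_map: dict, pids: list):
--     """Determines the window id of the youngest
--     parent owning a window.
--     """
--     for pid in pids:
--         window_id = pid_window_id_map.get(pid)
--         if window_id:
--             return window_id
--     return None
-- ===== Notes on version B (the rewrite author's own statement) =====
-- stated objective: simpler
-- what changed: Replaces the positional result array (filled by scanning the dict's items with pids.index, then rescanned by a generator for the first truthy entry) with a single loop over pids doing a direct dict .get lookup and returning the first truthy window id immediately.
import Mathlib
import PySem

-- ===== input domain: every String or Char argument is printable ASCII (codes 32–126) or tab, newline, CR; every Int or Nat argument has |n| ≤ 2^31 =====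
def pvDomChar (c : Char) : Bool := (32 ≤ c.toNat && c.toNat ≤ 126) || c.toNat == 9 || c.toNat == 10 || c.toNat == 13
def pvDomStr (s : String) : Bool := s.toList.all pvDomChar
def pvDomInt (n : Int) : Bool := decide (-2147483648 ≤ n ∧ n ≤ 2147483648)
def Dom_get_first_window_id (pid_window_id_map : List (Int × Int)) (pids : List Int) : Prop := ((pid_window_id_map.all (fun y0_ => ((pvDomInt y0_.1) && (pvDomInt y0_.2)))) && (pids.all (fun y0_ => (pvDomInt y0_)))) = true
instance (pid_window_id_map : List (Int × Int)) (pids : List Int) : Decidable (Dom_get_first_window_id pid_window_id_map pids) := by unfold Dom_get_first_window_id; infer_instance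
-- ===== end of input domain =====

-- B replaces A's positional result array (filled via pids.index from the dict's items, then
-- rescanned for the first truthy entry) by one loop over pids with a direct dict lookup and
-- early return: simpler, and asymptotically cheaper (no pids.index per dict item).

-- ===== PORT A =====
-- win_ids_res[pids.index(pid)] = window_id  (ValueError → pass)
def pvAssign (pids : List Int) (r : List (Option Int)) (kv : Int × Int) : List (Option Int) :=
  match PySem.List.index? pids kv.1 with
  | some i => r.set i (some kv.2)
  | none => r

-- next(i for i in win_ids_res if i)  with StopIteration → None  (truthiness: skips None and 0)
def pvFirstTruthy : List (Option Int) → Option Int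
  | [] => none
  | none :: rest => pvFirstTruthy rest
  | some v :: rest => if v = 0 then pvFirstTruthy rest else some v

def get_first_window_id (pid_window_id_map : List (Int × Int)) (pids : List Int) : Option Int :=
  let d := PySem.Dict.ofList pid_window_id_map
  let win_ids_res := d.items.foldl (pvAssign pids) (List.replicate pids.length none)
  pvFirstTruthy win_ids_res

-- ===== PORT B =====
-- for pid in pids: window_id = map.get(pid); if window_id: return window_id; return None
def pvAltLoop (d : PySem.Dict Int Int) : List Int → Option Int
  | [] => none
  | p :: rest =>
    match d.get? p with
    | some w => if w = 0 then pvAltLoop d rest else some w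
    | none => pvAltLoop d rest

def get_first_window_id_alt (pid_window_id_map : List (Int × Int)) (pids : List Int) : Option Int :=
  pvAltLoop (PySem.Dict.ofList pid_window_id_map) pids

-- ===== PRECONDITION & SPEC =====
def Spec_get_first_window_id (pid_window_id_map : List (Int × Int)) (pids : List Int) (out : Option Int) : Prop := out = get_first_window_id_alt pid_window_id_map pids
instance (pid_window_id_map : List (Int × Int)) (pids : List Int) (out : Option Int) : Decidable (Spec_get_first_window_id pid_window_id_map pids out) := by unfold Spec_get_first_window_id; infer_instance

-- ===== CLAIM (what is proved, stated in full; the proofs are below) =====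
def Claim_equal_get_first_window_id : Prop := ∀ (pid_window_id_map : List (Int × Int)) (pids : List Int), Dom_get_first_window_id pid_window_id_map pids → Spec_get_first_window_id pid_window_id_map pids (get_first_window_id pid_window_id_map pids)

-- ===== LEMMAS AND PROOFS =====

-- truthiness of an entry of win_ids_res
def pvTruthy : Option Int → Bool
  | none => false
  | some v => v ≠ 0

-- first match of key p in an association list (what dict lookup is, under unique keys)
def pvLook (l : List (Int × Int)) (p : Int) : Option Int :=
  (l.find? (fun kv => kv.1 == p)).map Prod.snd

theorem pvLook_append_singleton_of_ne (l : List (Int × Int)) (k v p : Int) (h : p ≠ k) :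
    pvLook (l ++ [(k, v)]) p = pvLook l p := by
  simp [pvLook, List.find?_append]
  cases hl : l.find? (fun kv => kv.1 == p) with
  | some kv => simp
  | none => simp [Ne.symm h]

theorem pvLook_append_singleton_self (l : List (Int × Int)) (k v : Int)
    (h : k ∉ l.map Prod.fst) : pvLook (l ++ [(k, v)]) k = some v := by
  have hl : l.find? (fun kv => kv.1 == k) = none := by
    rw [List.find?_eq_none]
    intro kv hkv
    simp only [beq_iff_eq]
    intro hk
    exact h (List.mem_map.mpr ⟨kv, hkv, hk⟩)
  simp [pvLook, List.find?_append, hl]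

-- get? on a Dict is first-match lookup on its items list
theorem get?_eq_pvLook (d : PySem.Dict Int Int) (p : Int) :
    d.get? p = pvLook d.items p := by
  cases d with
  | mk l =>
    induction l with
    | nil => rfl
    | cons kv rest ih =>
      cases kv with
      | mk k v =>
        rw [PySem.Dict.get?_mk_cons]
        by_cases h : k = p
        · simp [pvLook, h]
        · simpa [pvLook, List.find?_cons, Ne.symm h, h] using ih

-- the fold preserves the length of the result array
theorem pvFold_length (pids : List Int) (l : List (Int × Int)) (r : List (Option Int)) :
    (l.foldl (pvAssign pids) r).length = r.length := by
  induction l generalizing r with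
  | nil => rfl
  | cons kv rest ih => simp [List.foldl_cons, ih, pvAssign]; split <;> simp

-- characterization of the filled array: entry j holds the looked-up window id of pids[j]
-- exactly when j is the first occurrence of pids[j], else None  (needs unique keys in l)
theorem pvFold_char (pids : List Int) (l : List (Int × Int))
    (hnd : (l.map Prod.fst).Nodup) (j : Nat) (hj : j < pids.length) :
    (l.foldl (pvAssign pids) (List.replicate pids.length none))[j]? =
      some (if PySem.List.index? pids (pids[j]) = some j then pvLook l (pids[j]) else none) := by
  induction l using List.reverseRecOn with
  | nil =>
    simp [hj, pvLook]
  | append_singleton l kv ih =>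
    cases kv with
    | mk k v =>
      have hnd' : (List.map Prod.fst l).Nodup ∧ ∀ a x, (a, x) ∈ l → ¬a = k := by
        simpa [List.nodup_append] using hnd
      have hk : k ∉ l.map Prod.fst := by
        intro hkm
        obtain ⟨⟨a, b⟩, hab, hfst⟩ := List.mem_map.mp hkm
        exact hnd'.2 a b hab hfst
      have ihh := ih hnd'.1
      rw [List.foldl_append, List.foldl_cons, List.foldl_nil]
      cases hix : PySem.List.index? pids k with
      | none =>
        have hknot : k ∉ pids := (PySem.List.index?_eq_none_iff pids k).mp hix
        simp only [pvAssign, hix]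
        rw [ihh]
        by_cases hcond : PySem.List.index? pids (pids[j]) = some j
        · have hne : pids[j] ≠ k := fun he => hknot (he ▸ List.getElem_mem hj)
          rw [if_pos hcond, if_pos hcond, pvLook_append_singleton_of_ne l k v _ hne]
        · rw [if_neg hcond, if_neg hcond]
      | some i =>
        obtain ⟨hi, hpi, hmin⟩ := PySem.List.getElem_of_index?_eq_some hix
        simp only [pvAssign, hix]
        by_cases hji : j = i
        · subst hji
          have hlen : j < (List.foldl (pvAssign pids) (List.replicate pids.length none) l).length := by
            rw [pvFold_length]; simpa using hj
          have hcond : PySem.List.index? pids (pids[j]) = some j := by rw [hpi]; exact hix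
          rw [List.getElem?_set_self', List.getElem?_eq_getElem hlen, hcond, if_pos rfl, hpi,
              pvLook_append_singleton_self l k v hk]
          simp [Function.const]
        · rw [List.getElem?_set_ne (by omega), ihh]
          by_cases hpk : pids[j] = k
          · have hthis : PySem.List.index? pids (pids[j]) = some i := by rw [hpk]; exact hix
            have hij : ¬ (i = j) := fun h => hji h.symm
            rw [hthis, if_neg (by simpa using hij), if_neg (by simpa using hij)]
          · by_cases hcond : PySem.List.index? pids (pids[j]) = some j
            · rw [if_pos hcond, if_pos hcond, pvLook_append_singleton_of_ne l k v _ hpk]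
            · rw [if_neg hcond, if_neg hcond]

-- the generator scan is find? for the first truthy entry
theorem pvFirstTruthy_eq_find (L : List (Option Int)) :
    pvFirstTruthy L = (L.find? pvTruthy).join := by
  induction L with
  | nil => rfl
  | cons o rest ih =>
    cases o with
    | none => simpa [pvFirstTruthy, List.find?_cons, pvTruthy] using ih
    | some v =>
      by_cases hv : v = 0
      · simpa [pvFirstTruthy, pvTruthy, hv] using ih
      · simp [pvFirstTruthy, pvTruthy, hv]

-- B's loop is find? over pids for the first pid with truthy lookup
theorem pvAltLoop_eq_find (d : PySem.Dict Int Int) (ps : List Int) :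
    pvAltLoop d ps = (ps.find? (fun p => pvTruthy (d.get? p))).bind d.get? := by
  induction ps with
  | nil => rfl
  | cons p rest ih =>
    cases hg : d.get? p with
    | none => simpa [pvAltLoop, hg, List.find?_cons, pvTruthy] using ih
    | some w =>
      by_cases hw : w = 0
      · simpa [pvAltLoop, hg, pvTruthy, hw] using ih
      · simp [pvAltLoop, hg, pvTruthy, hw]

-- main equivalence, over any Dict with (automatically) unique keys
theorem pv_main (d : PySem.Dict Int Int) (hnd : (d.items.map Prod.fst).Nodup) (pids : List Int) :
    pvFirstTruthy (d.items.foldl (pvAssign pids) (List.replicate pids.length none)) =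
      pvAltLoop d pids := by
  set L := d.items.foldl (pvAssign pids) (List.replicate pids.length none) with hL
  have hlen : L.length = pids.length := by
    rw [hL, pvFold_length]; simp
  rw [pvFirstTruthy_eq_find, pvAltLoop_eq_find]
  cases hB : pids.find? (fun p => pvTruthy (d.get? p)) with
  | none =>
    have hall := List.find?_eq_none.mp hB
    have hnone : L.find? pvTruthy = none := by
      rw [List.find?_eq_none]
      intro o ho
      obtain ⟨j, hj, hje⟩ := List.getElem_of_mem ho
      have hjp : j < pids.length := hlen ▸ hj
      have hc := pvFold_char pids d.items hnd j hjp
      rw [← hL, List.getElem?_eq_getElem hj, hje] at hc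
      have ho' := Option.some.inj hc
      split at ho'
      · subst ho'
        have ha := hall _ (List.getElem_mem hjp)
        simpa [get?_eq_pvLook] using ha
      · subst ho'; simp [pvTruthy]
    simp [hnone]
  | some p =>
    rw [List.find?_eq_some_iff_getElem] at hB
    obtain ⟨hp, i, hi, hie, hmin⟩ := hB
    have hp' : pvTruthy (d.get? p) = true := by simpa using hp
    have hmem : p ∈ pids := hie ▸ List.getElem_mem hi
    obtain ⟨j0, hj0x⟩ := Option.isSome_iff_exists.mp ((PySem.List.index?_isSome_iff pids p).mpr hmem)
    obtain ⟨hj0, hpj0, hj0min⟩ := PySem.List.getElem_of_index?_eq_some hj0x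
    have hj0i : j0 ≤ i := by
      by_contra hlt
      exact hj0min i (by omega) hie
    have hfind : L.find? pvTruthy = some (d.get? p) := by
      rw [List.find?_eq_some_iff_getElem]
      refine ⟨hp', j0, by omega, ?_, ?_⟩
      · have hc := pvFold_char pids d.items hnd j0 hj0
        rw [← hL, List.getElem?_eq_getElem (by omega)] at hc
        have h2 := Option.some.inj hc
        rw [hpj0, hj0x, if_pos rfl, ← get?_eq_pvLook] at h2
        exact h2
      · intro j hj
        have hjp : j < pids.length := by omega
        have hc := pvFold_char pids d.items hnd j hjp
        rw [← hL, List.getElem?_eq_getElem (by rw [hlen]; omega)] at hc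
        have h2 := Option.some.inj hc
        rw [h2]
        split
        · rw [← get?_eq_pvLook]
          simpa using hmin j (by omega)
        · simp [pvTruthy]
    rw [hfind]
    cases hg : d.get? p with
    | none => rw [hg] at hp'; simp [pvTruthy] at hp'
    | some w => simp [hg]
-- ===== VERDICT (by name: the statement is the Claim_ definition above) =====
theorem get_first_window_id_spec : Claim_equal_get_first_window_id := by
  intro m pids _
  show get_first_window_id m pids = get_first_window_id_alt m pids
  have hnd : (((PySem.Dict.ofList m).items.map Prod.fst)).Nodup := by
    simpa [PySem.Dict.keys] using PySem.Dict.nodup_keys_ofList m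
  exact pv_main (PySem.Dict.ofList m) hnd pids
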